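-- pv_equiv track=rewrite | github.com/lakenn/interview_questions | two_sigma/task3.py | teamFormation
-- ===== SOURCE A (Python) =====
-- import heapq
--
-- class MyPriorityQueue:
--     def __init__(self):
--         self.queue = []
--
--     def top(self):
--         return self.queue[0]
--
--     def push(self, val):
--         heapq.heappush(self.queue, val)
--
--     def pop(self):
--         return heapq.heappop(self.queue)
--
-- def teamFormation(score, team, m):
--     # Write your code here
--     lpq = MyPriorityQueue()
--     rpq = MyPriorityQueue()
--
--     n = len(score)
--     left = 0
--     right = n - 1
--
--
--     while left < m:
--         lpq.push(-score[left])
--         left += 1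
--
--     while right >= n - m:
--         rpq.push(-score[right])
--         right -= 1
--
--     i = 0
--     max_score = 0
--
--     while i < team:
--         if len(lpq.queue) and len(rpq.queue):
--             if lpq.top() <= rpq.top():
--                 val = -lpq.pop()
--                 max_score += val
--                 pq = 1
--             else:
--                 val = -rpq.pop()
--                 max_score += val
--                 pq = 2
--
--             if not left > right :
--                 if pq == 1:
--                     lpq.push(-score[left])
--                     left += 1
--                 else:
--                     rpq.push(-score[right])
--                     right -= 1
--         else:
--             # exhausted
--             if len(lpq.queue):
--                 max_score += -lpq.pop()
--             else:
--                 max_score += -rpq.pop()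
--
--         i += 1
--
--     return max_score
-- ===== SOURCE B (Python) =====
-- def teamFormation(score, team, m):
--     # Two plain window lists + an explicit middle deque instead of heaps and index pointers.
--     n = len(score)
--     k = max(m, 0)
--     lw = list(score[:k])
--     rw = list(score[n - k:]) if k > 0 else []
--     mid = list(score[k:n - k])
--     total = 0
--     for _ in range(team):
--         if lw and rw:
--             if max(lw) >= max(rw):
--                 v = max(lw)
--                 lw.remove(v)
--                 if mid:
--                     lw.append(mid.pop(0))
--             else:
--                 v = max(rw)
--                 rw.remove(v)
--                 if mid:
--                     rw.append(mid.pop())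
--             total += v
--         elif lw:
--             v = max(lw)
--             lw.remove(v)
--             total += v
--         else:
--             v = max(rw)
--             rw.remove(v)
--             total += v
--     return total
-- ===== Notes on version B (the rewrite author's own statement) =====
-- stated objective: simpler
-- what changed: Replaces the two heapq priority queues of negated scores and the left/right index pointers by two plain window lists (max/remove) and an explicit middle segment obtained by slicing, consumed from its front or back instead of moving pointers.
import Mathlib
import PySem

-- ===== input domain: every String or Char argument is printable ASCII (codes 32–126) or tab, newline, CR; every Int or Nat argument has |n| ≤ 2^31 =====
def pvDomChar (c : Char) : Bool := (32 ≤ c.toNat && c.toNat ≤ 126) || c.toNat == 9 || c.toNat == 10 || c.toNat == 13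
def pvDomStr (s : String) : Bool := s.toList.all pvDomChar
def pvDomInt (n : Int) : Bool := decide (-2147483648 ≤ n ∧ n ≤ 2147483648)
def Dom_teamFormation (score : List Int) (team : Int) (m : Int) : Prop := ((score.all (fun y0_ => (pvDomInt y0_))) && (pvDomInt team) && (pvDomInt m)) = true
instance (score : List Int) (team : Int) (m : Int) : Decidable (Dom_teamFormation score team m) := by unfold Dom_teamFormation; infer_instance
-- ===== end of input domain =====

-- B replaces A's two heaps and index pointers by two plain window lists and an explicit middle
-- segment taken by slices (simpler; equal return value on Pre_; no speed claim).

-- ===== PORT A =====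
-- heapq is modeled as the list of pushed values: the only observable operations A performs on a
-- heap of Ints are len, top (= minimum value) and pop (= remove the minimum value), which this
-- model computes exactly (heappop/queue[0] return the minimum; which equal copy is removed is
-- indistinguishable for Int values).
def pvPush (q : List Int) (v : Int) : List Int := q ++ [v]
def pvTop (q : List Int) : Int := (PySem.List.min? q (fun x => x)).getD 0
def pvPop (q : List Int) : Int × List Int :=
  match PySem.List.min? q (fun x => x) with
  | some v => (v, (PySem.List.remove? q v).getD q)
  | none => (0, q)

def pvLoopA (score : List Int) : Nat → List Int → List Int → Int → Int → Int → Int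
  | 0, _, _, _, _, acc => acc
  | k+1, lq, rq, left, right, acc =>
    if lq.length ≠ 0 ∧ rq.length ≠ 0 then
      if pvTop lq ≤ pvTop rq then
        if ¬ left > right then
          pvLoopA score k (pvPush (pvPop lq).2 (-(PySem.List.pyGetD score left 0))) rq (left + 1) right (acc + (-(pvPop lq).1))
        else
          pvLoopA score k (pvPop lq).2 rq left right (acc + (-(pvPop lq).1))
      else
        if ¬ left > right then
          pvLoopA score k lq (pvPush (pvPop rq).2 (-(PySem.List.pyGetD score right 0))) left (right - 1) (acc + (-(pvPop rq).1))
        else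
          pvLoopA score k lq (pvPop rq).2 left right (acc + (-(pvPop rq).1))
    else
      if lq.length ≠ 0 then
        pvLoopA score k (pvPop lq).2 rq left right (acc + (-(pvPop lq).1))
      else
        pvLoopA score k lq (pvPop rq).2 left right (acc + (-(pvPop rq).1))

def teamFormation (score : List Int) (team : Int) (m : Int) : Int :=
  pvLoopA score team.toNat
    ((PySem.List.pyRange 0 m 1).foldl (fun q i => pvPush q (-(PySem.List.pyGetD score i 0))) [])
    ((PySem.List.pyRange ((score.length : Int) - 1) ((score.length : Int) - m - 1) (-1)).foldl
      (fun q i => pvPush q (-(PySem.List.pyGetD score i 0))) [])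
    (max m 0)
    (min ((score.length : Int) - m - 1) ((score.length : Int) - 1))
    0

-- ===== PORT B =====
def pvMax (l : List Int) : Int := (PySem.List.max? l (fun x => x)).getD 0
def pvRemove (l : List Int) (v : Int) : List Int := (PySem.List.remove? l v).getD l

def pvLoopB : Nat → List Int → List Int → List Int → Int → Int
  | 0, _, _, _, total => total
  | k+1, lw, rw, mid, total =>
    if lw ≠ [] ∧ rw ≠ [] then
      if pvMax lw ≥ pvMax rw then
        if hm : mid = [] then
          pvLoopB k (pvRemove lw (pvMax lw)) rw mid (total + pvMax lw)
        else
          pvLoopB k (pvRemove lw (pvMax lw) ++ [mid.head hm]) rw mid.tail (total + pvMax lw)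
      else
        if hm : mid = [] then
          pvLoopB k lw (pvRemove rw (pvMax rw)) mid (total + pvMax rw)
        else
          pvLoopB k lw (pvRemove rw (pvMax rw) ++ [mid.getLast hm]) mid.dropLast (total + pvMax rw)
    else if lw ≠ [] then
      pvLoopB k (pvRemove lw (pvMax lw)) rw mid (total + pvMax lw)
    else
      pvLoopB k lw (pvRemove rw (pvMax rw)) mid (total + pvMax rw)

def teamFormation_alt (score : List Int) (team : Int) (m : Int) : Int :=
  pvLoopB team.toNat
    (PySem.List.slice score none (some (max m 0)))
    (if max m 0 > 0 then PySem.List.slice score (some ((score.length : Int) - max m 0)) none else [])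
    (PySem.List.slice score (some (max m 0)) (some ((score.length : Int) - max m 0)))
    0

-- ===== PRECONDITION & SPEC =====
-- Pre_ is exactly where Python A returns normally: the initial fill indexes score[0..m-1] (so
-- m ≤ len(score) is needed even when team ≤ 0), and when team ≥ 1 it needs m ≥ 1 and at most
-- max(n, 2m) picks in total, else heappop is called on two empty heaps (IndexError).
def Pre_teamFormation (score : List Int) (team : Int) (m : Int) : Prop :=
  m ≤ (score.length : Int) ∧
    (team ≤ 0 ∨ (1 ≤ m ∧ team ≤ max (score.length : Int) (2 * m)))
instance (score : List Int) (team : Int) (m : Int) : Decidable (Pre_teamFormation score team m) := by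
  unfold Pre_teamFormation; infer_instance

def pvWitness_teamFormation : List Int × Int × Int := ([3, 1, 2], 2, 1)

def Spec_teamFormation (score : List Int) (team : Int) (m : Int) (out : Int) : Prop := out = teamFormation_alt score team m
instance (score : List Int) (team : Int) (m : Int) (out : Int) : Decidable (Spec_teamFormation score team m out) := by unfold Spec_teamFormation; infer_instance

-- ===== CLAIM (what is proved, stated in full; the proofs are below) =====
def Claim_equal_teamFormation : Prop := ∀ (score : List Int) (team : Int) (m : Int), Dom_teamFormation score team m → Pre_teamFormation score team m → Spec_teamFormation score team m (teamFormation score team m)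

-- ===== LEMMAS AND PROOFS =====

lemma pv_perm_ne_nil {q w : List Int} (hp : (q.map (fun x => -x)).Perm w) : q ≠ [] ↔ w ≠ [] := by
  constructor
  · intro h hw; subst hw; exact h (by simpa using hp.eq_nil)
  · intro h hq; subst hq; exact h hp.symm.eq_nil

lemma pv_top_eq (q : List Int) : pvTop q = (pvPop q).1 := by
  cases h : PySem.List.min? q (fun x => x) <;> simp [pvTop, pvPop, h]

lemma pv_pop_rel {q w : List Int} (hp : (q.map (fun x => -x)).Perm w) (hq : q ≠ []) :
    (pvPop q).1 = -(pvMax w) ∧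
    (((pvPop q).2).map (fun x => -x)).Perm (pvRemove w (pvMax w)) := by
  obtain ⟨a, ha⟩ : ∃ a, PySem.List.min? q (fun x => x) = some a := by
    cases h : PySem.List.min? q (fun x => x) with
    | none => exact absurd ((PySem.List.min?_eq_none_iff q _).1 h) hq
    | some a => exact ⟨a, rfl⟩
  have hw : w ≠ [] := by
    intro h; subst h
    exact hq (by simpa using hp.eq_nil)
  obtain ⟨b, hb⟩ : ∃ b, PySem.List.max? w (fun x => x) = some b := by
    cases h : PySem.List.max? w (fun x => x) with
    | none => exact absurd ((PySem.List.max?_eq_none_iff w _).1 h) hw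
    | some b => exact ⟨b, rfl⟩
  have hamem : a ∈ q := PySem.List.min?_mem ha
  have hbmem : b ∈ w := PySem.List.max?_mem hb
  have h1 : ∀ y ∈ q, a ≤ y := PySem.List.min?_isMin ha
  have h2 : ∀ y ∈ w, y ≤ b := PySem.List.max?_isMax hb
  have hba : b = -a := by
    obtain ⟨c, hc, hcb⟩ := List.mem_map.1 (hp.mem_iff.2 hbmem)
    have hna : (-a) ∈ w := hp.mem_iff.1 (List.mem_map.2 ⟨a, hamem, rfl⟩)
    have := h1 c hc
    have := h2 (-a) hna
    omega
  have hmax : pvMax w = b := by simp [pvMax, hb]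
  have hrem : pvRemove w (pvMax w) = w.erase b := by
    rw [hmax]; simp [pvRemove, PySem.List.remove?_eq_some_erase w b hbmem]
  have hpop1 : (pvPop q).1 = a := by simp [pvPop, ha]
  have hpop2 : (pvPop q).2 = q.erase a := by
    simp [pvPop, ha, PySem.List.remove?_eq_some_erase q a hamem]
  refine ⟨by omega, ?_⟩
  rw [hpop2, hrem, List.map_erase (fun x y hxy => by omega)]
  rw [hba]
  exact hp.erase _

lemma pv_pop_nil : pvPop ([] : List Int) = (0, []) := by decide

lemma pv_mid_cons (score : List Int) (left right : Int) (h0 : 0 ≤ left) (h1 : left ≤ right)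
    (h2 : right ≤ (score.length : Int) - 1) :
    (score.drop left.toNat).take (right + 1 - left).toNat
      = score[left.toNat]'(by omega) :: (score.drop (left + 1).toNat).take (right + 1 - (left + 1)).toNat := by
  have hL : left.toNat < score.length := by omega
  have hC : (right + 1 - left).toNat = (right + 1 - (left + 1)).toNat + 1 := by omega
  have hL1 : (left + 1).toNat = left.toNat + 1 := by omega
  rw [List.drop_eq_getElem_cons hL, hC, List.take_succ_cons, hL1]

lemma pv_mid_concat (score : List Int) (left right : Int) (h0 : 0 ≤ left) (h1 : left ≤ right)
    (h2 : right ≤ (score.length : Int) - 1) :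
    (score.drop left.toNat).take (right + 1 - left).toNat
      = ((score.drop left.toNat).take ((right - 1) + 1 - left).toNat) ++ [score[right.toNat]'(by omega)] := by
  have hC : (right + 1 - left).toNat = ((right - 1) + 1 - left).toNat + 1 := by omega
  have hlen : ((right - 1) + 1 - left).toNat < (score.drop left.toNat).length := by
    rw [List.length_drop]; omega
  rw [hC, List.take_add_one, List.getElem?_eq_getElem hlen]
  simp [List.getElem_drop]
  congr 1
  omega

lemma pv_loop_eq (score : List Int) (k : Nat) :
    ∀ (lq rq : List Int) (left right acc : Int) (lw rw mid : List Int) (total : Int),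
    (lq.map (fun x => -x)).Perm lw →
    (rq.map (fun x => -x)).Perm rw →
    acc = total →
    0 ≤ left → right ≤ (score.length : Int) - 1 →
    mid = (score.drop left.toNat).take (right + 1 - left).toNat →
    pvLoopA score k lq rq left right acc = pvLoopB k lw rw mid total := by
  induction k with
  | zero => intro lq rq left right acc lw rw mid total _ _ hacc _ _ _; exact hacc
  | succ k ih =>
    intro lq rq left right acc lw rw mid total hpl hpr hacc h0 h2 hmid
    subst hacc hmid
    simp only [pvLoopA, pvLoopB]
    by_cases hcond : lq ≠ [] ∧ rq ≠ []
    · have hcB : lw ≠ [] ∧ rw ≠ [] :=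
        ⟨(pv_perm_ne_nil hpl).1 hcond.1, (pv_perm_ne_nil hpr).1 hcond.2⟩
      have hcA : lq.length ≠ 0 ∧ rq.length ≠ 0 := by
        simpa [List.length_eq_zero_iff] using hcond
      rw [if_pos hcA, if_pos hcB]
      obtain ⟨hv1, hq1⟩ := pv_pop_rel hpl hcond.1
      obtain ⟨hv2, hq2⟩ := pv_pop_rel hpr hcond.2
      have ht1 : pvTop lq = -(pvMax lw) := (pv_top_eq lq).trans hv1
      have ht2 : pvTop rq = -(pvMax rw) := (pv_top_eq rq).trans hv2
      by_cases hcomp : pvMax rw ≤ pvMax lw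
      · rw [if_pos (by omega : pvTop lq ≤ pvTop rq),
            if_pos (by exact hcomp : pvMax lw ≥ pvMax rw)]
        by_cases hg : left ≤ right
        · have hmc := pv_mid_cons score left right h0 hg h2
          have hne : (score.drop left.toNat).take (right + 1 - left).toNat ≠ [] := by
            rw [hmc]; simp
          rw [if_pos (by omega : ¬ left > right), dif_neg hne]
          have hget : PySem.List.pyGetD score left 0 = score[left.toNat]'(by omega) :=
            PySem.List.pyGetD_eq_getElem score 0 h0 (by omega)
          simp only [hmc, List.head_cons, List.tail_cons]
          apply ih
          · simp only [pvPush, List.map_append, List.map_cons, List.map_nil, hget, neg_neg]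
            exact hq1.append (List.Perm.refl _)
          · exact hpr
          · omega
          · omega
          · omega
          · rfl
        · have hmid0 : (score.drop left.toNat).take (right + 1 - left).toNat = [] := by
            have h : (right + 1 - left).toNat = 0 := by omega
            rw [h]; simp
          rw [if_neg (by omega : ¬ ¬ left > right), dif_pos hmid0]
          apply ih
          · exact hq1
          · exact hpr
          · omega
          · omega
          · omega
          · exact hmid0.symm ▸ rfl
      · rw [if_neg (by omega : ¬ pvTop lq ≤ pvTop rq),
            if_neg (by omega : ¬ pvMax lw ≥ pvMax rw)]
        by_cases hg : left ≤ right
        · have hmc := pv_mid_concat score left right h0 hg h2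
          have hne : (score.drop left.toNat).take (right + 1 - left).toNat ≠ [] := by
            rw [hmc]; simp
          rw [if_pos (by omega : ¬ left > right), dif_neg hne]
          have hget : PySem.List.pyGetD score right 0 = score[right.toNat]'(by omega) :=
            PySem.List.pyGetD_eq_getElem score 0 (by omega) (by omega)
          simp only [hmc]
          simp
          apply ih
          · exact hpl
          · simp only [pvPush, List.map_append, List.map_cons, List.map_nil, hget, neg_neg]
            exact hq2.append (List.Perm.refl _)
          · omega
          · omega
          · omega
          · have he : right - 1 + 1 - left = right - left := by ring
            rw [he]
        · have hmid0 : (score.drop left.toNat).take (right + 1 - left).toNat = [] := by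
            have h : (right + 1 - left).toNat = 0 := by omega
            rw [h]; simp
          rw [if_neg (by omega : ¬ ¬ left > right), dif_pos hmid0]
          apply ih
          · exact hpl
          · exact hq2
          · omega
          · omega
          · omega
          · exact hmid0.symm ▸ rfl
    · have hcB : ¬(lw ≠ [] ∧ rw ≠ []) := by
        intro hc
        exact hcond ⟨(pv_perm_ne_nil hpl).2 hc.1, (pv_perm_ne_nil hpr).2 hc.2⟩
      have hcA : ¬(lq.length ≠ 0 ∧ rq.length ≠ 0) := by
        intro hc
        exact hcond ⟨by simpa [List.length_eq_zero_iff] using hc.1,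
                     by simpa [List.length_eq_zero_iff] using hc.2⟩
      rw [if_neg hcA, if_neg hcB]
      by_cases hl : lq ≠ []
      · have hlw : lw ≠ [] := (pv_perm_ne_nil hpl).1 hl
        obtain ⟨hv1, hq1⟩ := pv_pop_rel hpl hl
        rw [if_pos (by simpa [List.length_eq_zero_iff] using hl), if_pos hlw]
        apply ih
        · exact hq1
        · exact hpr
        · omega
        · omega
        · omega
        · rfl
      · simp only [ne_eq, not_not] at hl
        have hlw : lw = [] := by
          by_contra hlw
          exact ((pv_perm_ne_nil hpl).2 hlw) hl
        rw [if_neg (by simp [hl]), if_neg (by simp [hlw])]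
        by_cases hr : rq ≠ []
        · obtain ⟨hv2, hq2⟩ := pv_pop_rel hpr hr
          apply ih
          · exact hpl
          · exact hq2
          · omega
          · omega
          · omega
          · rfl
        · simp only [ne_eq, not_not] at hr
          have hrw : rw = [] := by
            by_contra hrw
            exact ((pv_perm_ne_nil hpr).2 hrw) hr
          subst hl hr hlw hrw
          simp only [pv_pop_nil]
          apply ih
          · simp
          · have h1 : pvMax ([] : List Int) = 0 := by decide
            have h2 : pvRemove ([] : List Int) 0 = [] := by decide
            rw [h1, h2]; simp
          · have h1 : pvMax ([] : List Int) = 0 := by decide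
            rw [h1]; ring
          · omega
          · omega
          · rfl

lemma pv_init_take (xs : List Int) (M : Nat) (h : M ≤ xs.length) :
    (List.range M).map (fun k => xs.getD k 0) = xs.take M := by
  induction M with
  | zero => simp
  | succ M ih =>
    rw [List.range_succ, List.map_append, ih (by omega), List.take_add_one]
    simp [List.getD, List.getElem?_eq_getElem (by omega : M < xs.length)]

lemma pv_init_left (score : List Int) (m : Int) (hm : 0 ≤ m) (hmn : m ≤ (score.length : Int)) :
    ((PySem.List.pyRange 0 m 1).foldl (fun q i => pvPush q (-(PySem.List.pyGetD score i 0))) []).map (fun x => -x)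
      = score.take m.toNat := by
  simp only [pvPush]
  rw [PySem.List.foldl_append_singleton_eq_map (fun i => -(PySem.List.pyGetD score i 0))]
  have hcast : m = ((m.toNat : Nat) : Int) := by omega
  rw [List.nil_append, List.map_map, hcast, PySem.List.pyRange_zero_nat, List.map_map]
  have hfun : (((fun x => -x) ∘ fun i => -(PySem.List.pyGetD score i 0)) ∘ (fun k : Nat => (k : Int)))
      = fun k : Nat => score.getD k 0 := by
    funext k
    simp [PySem.List.pyGetD_natCast]
  rw [hfun, pv_init_take score m.toNat (by omega)]
  congr 1

lemma pv_init_right (score : List Int) (m : Int) (_hm : 0 ≤ m) (hmn : m ≤ (score.length : Int)) :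
    ((PySem.List.pyRange ((score.length : Int) - 1) ((score.length : Int) - m - 1) (-1)).foldl
        (fun q i => pvPush q (-(PySem.List.pyGetD score i 0))) []).map (fun x => -x)
      = (score.drop ((score.length : Int) - m).toNat).reverse := by
  simp only [pvPush]
  rw [PySem.List.foldl_append_singleton_eq_map (fun i => -(PySem.List.pyGetD score i 0))]
  rw [List.nil_append, List.map_map, PySem.List.pyRange_neg_one_eq_reverse]
  have e1 : (score.length : Int) - m - 1 + 1 = (score.length : Int) - m := by ring
  have e2 : (score.length : Int) - 1 + 1 = (score.length : Int) := by ring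
  rw [e1, e2, List.map_reverse]
  congr 1
  have hfun : ((fun x => -x) ∘ fun i => -(PySem.List.pyGetD score i 0))
      = fun j => PySem.List.pyGetD score j 0 := by
    funext j; simp
  rw [hfun, PySem.List.map_pyGetD_pyRange' score 0 (by omega : (0:Int) ≤ (score.length : Int) - m)]

-- ===== VERDICT (by name: the statement is the Claim_ definition above) =====
theorem teamFormation_spec : Claim_equal_teamFormation := by
  intro score team m hdom hpre
  unfold Spec_teamFormation
  obtain ⟨hmn, hteam⟩ := hpre
  by_cases ht : team ≤ 0
  · simp only [teamFormation, teamFormation_alt, Int.toNat_of_nonpos ht]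
    rfl
  · have hm : 1 ≤ m := by
      rcases hteam with h | h
      · omega
      · exact h.1
    have hmaxm : max m 0 = m := max_eq_left (by omega)
    have hmin : min ((score.length : Int) - m - 1) ((score.length : Int) - 1)
        = (score.length : Int) - m - 1 := min_eq_left (by omega)
    simp only [teamFormation, teamFormation_alt, hmaxm, hmin]
    rw [if_pos (by omega : m > 0)]
    apply pv_loop_eq
    · rw [pv_init_left score m (by omega) hmn, PySem.List.slice_to score (by omega : (0:Int) ≤ m)]
    · rw [pv_init_right score m (by omega) hmn,
          PySem.List.slice_from score (by omega : (0:Int) ≤ (score.length : Int) - m)]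
      exact List.reverse_perm _
    · rfl
    · omega
    · omega
    · rw [PySem.List.slice_toNat score (by omega : (0:Int) ≤ m)
            (by omega : (0:Int) ≤ (score.length : Int) - m)]
      have e : ((score.length : Int) - m - 1 + 1 - m).toNat
          = ((score.length : Int) - m).toNat - m.toNat := by omega
      rw [e]
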